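-- pv_equiv track=rewrite | github.com/MrBrantCode/unitest_baseline | mut_generate/mist_train_taco/taco_275/solution.py | calculate_sum_lcm_gcd
-- ===== SOURCE A (Python) =====
-- from math import gcd
--
-- def calculate_sum_lcm_gcd(n, MOD=10**9 + 7):
--     # Precompute Euler's Totient function values
--     phi = list(range(n + 1))
--     for i in range(2, n + 1):
--         if phi[i] == i:
--             for j in range(i, n + 1, i):
--                 phi[j] = phi[j] * (i - 1) // i
--
--     # Precompute prefix sums of phi and phi * i
--     P = [0, 0]
--     Q = [0, 0]
--     for i in range(2, n + 1):
--         P.append((P[-1] + phi[i]) % MOD)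
--         Q.append((Q[-1] + phi[i] * i) % MOD)
--
--     # Calculate the total sum
--     tot = 0
--     for g in range(1, n):
--         c = n // g
--         tot += n * g * P[c] // gcd(n, g) % MOD
--         tot -= g * g * Q[c] // gcd(n, g) % MOD
--
--     return tot % MOD
-- ===== SOURCE B (Python) =====
-- from math import gcd
--
-- def calculate_sum_lcm_gcd(n, MOD=10**9 + 7):
--     # Totients via a smallest-prime-factor sieve + multiplicative recurrence
--     # (each spf cell is written once; phi[i] comes from phi[i // spf[i]]).
--     spf = [0] * (n + 1)
--     for i in range(2, n + 1):
--         if spf[i] == 0: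
--             for j in range(i, n + 1, i):
--                 if spf[j] == 0:
--                     spf[j] = i
--     phi = [0] * (n + 1)
--     if n >= 1:
--         phi[1] = 1
--     for i in range(2, n + 1):
--         p = spf[i]
--         m = i // p
--         phi[i] = phi[m] * p if m % p == 0 else phi[m] * (p - 1)
--
--     # Precompute prefix sums of phi and phi * i
--     P = [0, 0]
--     Q = [0, 0]
--     for i in range(2, n + 1):
--         P.append((P[-1] + phi[i]) % MOD)
--         Q.append((Q[-1] + phi[i] * i) % MOD)
--
--     # Calculate the total sum
--     tot = 0
--     for g in range(1, n):
--         c = n // g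
--         tot += n * g * P[c] // gcd(n, g) % MOD
--         tot -= g * g * Q[c] // gcd(n, g) % MOD
--
--     return tot % MOD
-- ===== Notes on version B (the rewrite author's own statement) =====
-- stated objective: alternative
-- what changed: The Eratosthenes-style in-place totient sieve (phi[j] = phi[j]*(i-1)//i for every multiple of each prime) is replaced by a smallest-prime-factor sieve that writes each spf cell once, followed by the multiplicative totient recurrence phi[i] = phi[i//p]*(p or p-1); the prefix-sum arrays and the final summation loop are kept verbatim.
import Mathlib
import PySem

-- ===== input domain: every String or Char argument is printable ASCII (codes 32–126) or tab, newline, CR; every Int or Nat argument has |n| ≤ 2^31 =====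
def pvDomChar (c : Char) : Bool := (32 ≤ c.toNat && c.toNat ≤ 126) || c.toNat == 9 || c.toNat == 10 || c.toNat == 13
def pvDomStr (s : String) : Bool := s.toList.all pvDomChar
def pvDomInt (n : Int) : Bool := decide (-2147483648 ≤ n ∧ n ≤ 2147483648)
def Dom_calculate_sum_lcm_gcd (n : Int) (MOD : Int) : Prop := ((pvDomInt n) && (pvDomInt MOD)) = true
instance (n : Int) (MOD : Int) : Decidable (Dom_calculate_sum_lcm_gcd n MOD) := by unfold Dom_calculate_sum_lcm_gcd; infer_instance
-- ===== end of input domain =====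

-- B replaces A's in-place Eratosthenes totient sieve by a smallest-prime-factor sieve
-- followed by the multiplicative totient recurrence (objective: alternative algorithm;
-- the prefix-sum and summation phases are shared verbatim by both sources).


-- ===== SHARED HELPERS (hand ports of Python list indexing; exact where noted) =====
-- a[i] with a default: exact for every in-range index, negative indices count from the
-- end as in Python; out-of-range (where Python raises) yields the default, which the
-- ports below never reach on admitted inputs.
def pvGetD (a : Array Int) (i : Int) (d : Int) : Int :=
  if 0 ≤ i then a.getD i.toNat d
  else if (-i).toNat ≤ a.size then a.getD (a.size - (-i).toNat) d else d

-- a[i] = v: exact for the non-negative in-range indices the ports assign to.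
def pvSetD (a : Array Int) (i : Int) (v : Int) : Array Int :=
  if 0 ≤ i then a.setIfInBounds i.toNat v else a

-- ===== SHARED TAIL (both Python sources contain these two loops verbatim):
-- prefix sums P, Q of phi and phi*i, then the g-loop and the final mod =====
def pvRest (n MOD : Int) (phi : Array Int) : Int :=
  let PQ :=
    (PySem.List.pyRange 2 (n + 1)).foldl
      (fun (PQ : Array Int × Array Int) i =>
        (PQ.1.push (PySem.Int.mod (pvGetD PQ.1 (-1) 0 + pvGetD phi i 0) MOD),
         PQ.2.push (PySem.Int.mod (pvGetD PQ.2 (-1) 0 + pvGetD phi i 0 * i) MOD)))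
      (#[0, 0], #[0, 0])
  let tot :=
    (PySem.List.pyRange 1 n).foldl
      (fun tot g =>
        let c := PySem.Int.floordiv n g
        let tot := tot + PySem.Int.mod (PySem.Int.floordiv (n * g * pvGetD PQ.1 c 0) ((Int.gcd n g : Nat) : Int)) MOD
        tot - PySem.Int.mod (PySem.Int.floordiv (g * g * pvGetD PQ.2 c 0) ((Int.gcd n g : Nat) : Int)) MOD)
      0
  PySem.Int.mod tot MOD

-- ===== PORT A =====
-- phi = list(range(n+1)); Eratosthenes-style totient sieve: phi[j] = phi[j]*(i-1)//i
def pvAInner (n i : Int) (phi : Array Int) : Array Int :=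
  (PySem.List.pyRange i (n + 1) i).foldl
    (fun phi j =>
      pvSetD phi j (PySem.Int.floordiv (pvGetD phi j 0 * (i - 1)) i)) phi

def pvASieve (n : Int) : Array Int :=
  (PySem.List.pyRange 2 (n + 1)).foldl
    (fun phi i => if pvGetD phi i 0 == i then pvAInner n i phi else phi)
    ((PySem.List.pyRange 0 (n + 1)).toArray)

def calculate_sum_lcm_gcd (n : Int) (MOD : Int) : Int :=
  pvRest n MOD (pvASieve n)

-- ===== PORT B =====
-- spf = [0]*(n+1); smallest-prime-factor sieve (each cell written at most once)
def pvBSpf (n : Int) : Array Int :=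
  (PySem.List.pyRange 2 (n + 1)).foldl
    (fun spf i =>
      if pvGetD spf i 0 == 0 then
        (PySem.List.pyRange i (n + 1) i).foldl
          (fun spf j => if pvGetD spf j 0 == 0 then pvSetD spf j i else spf) spf
      else spf)
    ((List.replicate (n + 1).toNat 0).toArray)

-- phi = [0]*(n+1); phi[1] = 1; phi[i] = phi[m]*p if m % p == 0 else phi[m]*(p-1), m = i//p
def pvBPhi (n : Int) : Array Int :=
  let spf := pvBSpf n
  let phi0 : Array Int := (List.replicate (n + 1).toNat 0).toArray
  let phi1 := if n ≥ 1 then pvSetD phi0 1 1 else phi0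
  (PySem.List.pyRange 2 (n + 1)).foldl
    (fun phi i =>
      let p := pvGetD spf i 0
      let m := PySem.Int.floordiv i p
      pvSetD phi i
        (if PySem.Int.mod m p == 0 then pvGetD phi m 0 * p
         else pvGetD phi m 0 * (p - 1)))
    phi1

def calculate_sum_lcm_gcd_alt (n : Int) (MOD : Int) : Int :=
  pvRest n MOD (pvBPhi n)

-- ===== PRECONDITION & SPEC =====
-- A raises ZeroDivisionError iff MOD = 0 (the '% MOD' reductions); that is all Pre_ excludes.
def Pre_calculate_sum_lcm_gcd (n : Int) (MOD : Int) : Prop := MOD ≠ 0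
instance (n : Int) (MOD : Int) : Decidable (Pre_calculate_sum_lcm_gcd n MOD) := by unfold Pre_calculate_sum_lcm_gcd; infer_instance
def pvWitness_calculate_sum_lcm_gcd : Int × Int := (5, 7)

def Spec_calculate_sum_lcm_gcd (n : Int) (MOD : Int) (out : Int) : Prop := out = calculate_sum_lcm_gcd_alt n MOD
instance (n : Int) (MOD : Int) (out : Int) : Decidable (Spec_calculate_sum_lcm_gcd n MOD out) := by unfold Spec_calculate_sum_lcm_gcd; infer_instance

-- ===== CLAIM (what is proved, stated in full; the proofs are below) =====
def Claim_equal_calculate_sum_lcm_gcd : Prop := ∀ (n : Int) (MOD : Int), Dom_calculate_sum_lcm_gcd n MOD → Pre_calculate_sum_lcm_gcd n MOD → Spec_calculate_sum_lcm_gcd n MOD (calculate_sum_lcm_gcd n MOD)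

-- ===== LEMMAS AND PROOFS =====

-- List-level models of the two sieves (proof-only; the ports above compute them on arrays)
def pvAInnerL (n i : Int) (phi : List Int) : List Int :=
  (PySem.List.pyRange i (n + 1) i).foldl
    (fun phi j =>
      PySem.List.pySetD phi j
        (PySem.Int.floordiv (PySem.List.pyGetD phi j 0 * (i - 1)) i)) phi

def pvASieveL (n : Int) : List Int :=
  (PySem.List.pyRange 2 (n + 1)).foldl
    (fun phi i => if PySem.List.pyGetD phi i 0 == i then pvAInnerL n i phi else phi)
    (PySem.List.pyRange 0 (n + 1))

def pvBSpfL (n : Int) : List Int :=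
  (PySem.List.pyRange 2 (n + 1)).foldl
    (fun spf i =>
      if PySem.List.pyGetD spf i 0 == 0 then
        (PySem.List.pyRange i (n + 1) i).foldl
          (fun spf j =>
            if PySem.List.pyGetD spf j 0 == 0 then PySem.List.pySetD spf j i else spf) spf
      else spf)
    (List.replicate (n + 1).toNat 0)

def pvBPhiL (n : Int) : List Int :=
  (PySem.List.pyRange 2 (n + 1)).foldl
    (fun phi i =>
      PySem.List.pySetD phi i
        (if PySem.Int.mod (PySem.Int.floordiv i (PySem.List.pyGetD (pvBSpfL n) i 0))
              (PySem.List.pyGetD (pvBSpfL n) i 0) == 0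
         then PySem.List.pyGetD phi (PySem.Int.floordiv i (PySem.List.pyGetD (pvBSpfL n) i 0)) 0
                * PySem.List.pyGetD (pvBSpfL n) i 0
         else PySem.List.pyGetD phi (PySem.Int.floordiv i (PySem.List.pyGetD (pvBSpfL n) i 0)) 0
                * (PySem.List.pyGetD (pvBSpfL n) i 0 - 1)))
    (if n ≥ 1 then PySem.List.pySetD (List.replicate (n + 1).toNat 0) 1 1
     else List.replicate (n + 1).toNat 0)

def pvP (j k : Nat) : Nat := ∏ p ∈ j.primeFactors.filter (· ≤ k), p
def pvQ (j k : Nat) : Nat := ∏ p ∈ j.primeFactors.filter (· ≤ k), (p - 1)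
def pvAval (j k : Nat) : Nat := (j / pvP j k) * pvQ j k

theorem pvP_dvd (j k : Nat) : pvP j k ∣ j :=
  dvd_trans (Finset.prod_dvd_prod_of_subset _ _ _ (Finset.filter_subset _ _))
    (Nat.prod_primeFactors_dvd j)

theorem pvP_pos (j k : Nat) : 0 < pvP j k :=
  Finset.prod_pos fun p hp => (Nat.prime_of_mem_primeFactors (Finset.mem_filter.mp hp).1).pos

theorem pvAval_one (j : Nat) : pvAval j 1 = j := by
  have h : j.primeFactors.filter (· ≤ 1) = ∅ := by
    rw [Finset.filter_eq_empty_iff]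
    intro p hp
    have := (Nat.prime_of_mem_primeFactors hp).two_le
    simp; omega
  simp [pvAval, pvP, pvQ, h]

theorem pvAval_skip (j k : Nat) (h : ¬((k+1).Prime ∧ (k+1) ∣ j ∧ j ≠ 0)) :
    pvAval j (k+1) = pvAval j k := by
  have hf : j.primeFactors.filter (· ≤ k+1) = j.primeFactors.filter (· ≤ k) := by
    apply Finset.filter_congr
    intro p hp
    rcases Nat.mem_primeFactors.mp hp with ⟨hp1, hp2, hp3⟩
    constructor
    · intro hle
      by_cases hpk : p = k+1
      · subst hpk; exact absurd ⟨hp1, hp2, hp3⟩ h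
      · omega
    · omega
  simp [pvAval, pvP, pvQ, hf]

theorem pvAval_step (i j : Nat) (hp : i.Prime) (hd : i ∣ j) (hj : 0 < j) :
    pvAval j (i - 1) * (i - 1) / i = pvAval j i := by
  have hi2 := hp.two_le
  have hmem : i ∈ j.primeFactors := Nat.mem_primeFactors.mpr ⟨hp, hd, hj.ne'⟩
  have hnotS : i ∉ j.primeFactors.filter (· ≤ i - 1) := by
    simp; omega
  have hf : j.primeFactors.filter (· ≤ i) = insert i (j.primeFactors.filter (· ≤ i - 1)) := by
    ext p
    simp only [Finset.mem_filter, Finset.mem_insert, decide_eq_true_eq]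
    constructor
    · rintro ⟨h1, h2⟩
      by_cases hpi : p = i
      · left; exact hpi
      · right; exact ⟨h1, by omega⟩
    · rintro (rfl | ⟨h1, h2⟩)
      · exact ⟨hmem, le_refl _⟩
      · exact ⟨h1, by omega⟩
  have hPi : pvP j i = i * pvP j (i-1) := by
    rw [pvP, hf, Finset.prod_insert hnotS]; rfl
  have hQi : pvQ j i = (i-1) * pvQ j (i-1) := by
    rw [pvQ, hf, Finset.prod_insert hnotS]; rfl
  have hcop : Nat.Coprime i (pvP j (i-1)) := by
    apply Nat.Coprime.prod_right
    intro p hpmem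
    rcases Finset.mem_filter.mp hpmem with ⟨h1, h2⟩
    have hpp := Nat.prime_of_mem_primeFactors h1
    exact (Nat.coprime_primes hp hpp).mpr (by omega)
  have hiP : i * pvP j (i-1) ∣ j :=
    Nat.Coprime.mul_dvd_of_dvd_of_dvd hcop hd (pvP_dvd j (i-1))
  have hP := pvP_pos j (i-1)
  set P := pvP j (i-1) with hPdef
  set Q := pvQ j (i-1) with hQdef
  obtain ⟨t, ht⟩ := hiP
  have hjP : j / P = i * t := by
    rw [ht, show i * P * t = P * (i * t) by ring]
    exact Nat.mul_div_cancel_left _ hP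
  have hjPi : j / pvP j i = t := by
    rw [hPi, ht, show i * P * t = (i * P) * t by ring]
    exact Nat.mul_div_cancel_left _ (by positivity)
  rw [pvAval, pvAval, hjP, hjPi, hQi]
  rw [show i * t * Q * (i-1) = i * (t * ((i-1) * Q)) by ring]
  exact Nat.mul_div_cancel_left _ (by omega)

theorem pvAval_prime_iff (i : Nat) (hi : 2 ≤ i) : (pvAval i (i - 1) = i ↔ i.Prime) := by
  constructor
  · intro heq
    by_contra hnp
    have hmf : i.minFac < i := by
      rcases Nat.lt_or_ge i.minFac i with h | h
      · exact h
      · exfalso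
        have := Nat.minFac_le (by omega : 0 < i)
        exact hnp (Nat.prime_def_minFac.mpr ⟨hi, by omega⟩)
    have hmfp : i.minFac.Prime := Nat.minFac_prime (by omega)
    have hmem : i.minFac ∈ i.primeFactors.filter (· ≤ i - 1) := by
      simp only [Finset.mem_filter, decide_eq_true_eq]
      exact ⟨Nat.mem_primeFactors.mpr ⟨hmfp, Nat.minFac_dvd i, by omega⟩, by omega⟩
    have hne : (i.primeFactors.filter (· ≤ i - 1)).Nonempty := ⟨_, hmem⟩
    have hQP : pvQ i (i-1) < pvP i (i-1) := by
      apply Finset.prod_lt_prod_of_nonempty _ _ hne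
      · intro p hp
        have := (Nat.prime_of_mem_primeFactors (Finset.mem_filter.mp hp).1).two_le
        omega
      · intro p hp
        have := (Nat.prime_of_mem_primeFactors (Finset.mem_filter.mp hp).1).two_le
        omega
    have hP := pvP_pos i (i-1)
    have hdvd := pvP_dvd i (i-1)
    have hpos : 0 < i / pvP i (i-1) := Nat.div_pos (Nat.le_of_dvd (by omega) hdvd) hP
    have : pvAval i (i-1) < (i / pvP i (i-1)) * pvP i (i-1) := by
      exact mul_lt_mul_of_pos_left hQP hpos
    rw [Nat.div_mul_cancel hdvd] at this
    omega
  · intro hp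
    have hf : i.primeFactors.filter (· ≤ i - 1) = ∅ := by
      rw [hp.primeFactors, Finset.filter_eq_empty_iff]
      intro p hp'
      simp at hp' ⊢
      omega
    simp [pvAval, pvP, pvQ, hf]

theorem pvAval_tot (j k : Nat) (h : ∀ p ∈ j.primeFactors, p ≤ k) :
    pvAval j k = Nat.totient j := by
  have hf : j.primeFactors.filter (· ≤ k) = j.primeFactors := by
    rw [Finset.filter_eq_self]
    intro p hp
    simpa using h p hp
  have key := Nat.totient_mul_prod_primeFactors j
  have hP : pvP j k = ∏ p ∈ j.primeFactors, p := by rw [pvP, hf]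
  have hQ : pvQ j k = ∏ p ∈ j.primeFactors, (p - 1) := by rw [pvQ, hf]
  have hdvd := pvP_dvd j k
  have hPpos := pvP_pos j k
  rw [pvAval]
  set P := pvP j k with hPdef
  set Q := pvQ j k with hQdef
  obtain ⟨t, ht⟩ := hdvd
  have hjP : j / P = t := by
    rw [ht]; exact Nat.mul_div_cancel_left _ hPpos
  rw [hjP]
  have h2 : Nat.totient j * P = (t * Q) * P := by
    rw [hP, hQ]
    calc Nat.totient j * ∏ p ∈ j.primeFactors, p = j * ∏ p ∈ j.primeFactors, (p-1) := key
    _ = (t * ∏ p ∈ j.primeFactors, (p-1)) * ∏ p ∈ j.primeFactors, p := by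
          nth_rewrite 1 [ht]; rw [hP]; ring
  exact (Nat.eq_of_mul_eq_mul_right hPpos h2).symm

theorem pv_getD_set (l : List Int) (n t : Nat) (v : Int) (ht : t < l.length) :
    (l.set n v).getD t 0 = if t = n then (if n < l.length then v else l.getD t 0) else l.getD t 0 := by
  simp only [List.getD_eq_getElem?_getD, List.getElem?_set]
  rcases eq_or_ne t n with rfl | hne
  · by_cases h : t < l.length <;> simp [h]
  · simp [Ne.symm hne, hne]
theorem pv_getD_map_range (f : Nat → Int) (N t : Nat) (ht : t < N) :
    ((List.range N).map f).getD t 0 = f t := by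
  rw [List.getD_eq_getElem _ _ (by simpa using ht)]
  simp

theorem pv_mem_mults (i N : Nat) (hi : 0 < i) (x : Int) :
    x ∈ PySem.List.pyRange (i : Int) ((N : Int) + 1) (i : Int) ↔
      ∃ d : Nat, 1 ≤ d ∧ x = (i * d : Nat) ∧ i * d ≤ N := by
  have hi' : (0:Int) < i := by exact_mod_cast hi
  rw [PySem.List.mem_pyRange_iff_of_pos hi']
  constructor
  · rintro ⟨h1, h2, c, hc⟩
    have hx : x = (i:Int) * (c + 1) := by linarith [hc]
    have hc0 : 0 ≤ c := by nlinarith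
    refine ⟨(c+1).toNat, by omega, ?_, ?_⟩
    · push_cast [Int.toNat_of_nonneg (by omega : (0:Int) ≤ c + 1)]
      linarith
    · have : ((i * (c+1).toNat : Nat) : Int) ≤ (N : Int) := by
        push_cast [Int.toNat_of_nonneg (by omega : (0:Int) ≤ c + 1)]
        nlinarith
      exact_mod_cast this
  · rintro ⟨d, hd1, rfl, hdN⟩
    have hd' : (1:Int) ≤ d := by exact_mod_cast hd1
    refine ⟨?_, ?_, ⟨(d:Int) - 1, by push_cast; ring⟩⟩
    · push_cast; nlinarith
    · have : ((i * d : Nat) : Int) ≤ N := by exact_mod_cast hdN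
      omega

theorem pv_nodup_mults (i N : Nat) (hi : 0 < i) :
    (PySem.List.pyRange (i : Int) ((N : Int) + 1) (i : Int)).Nodup := by
  rw [PySem.List.pyRange_of_pos _ _ (by exact_mod_cast hi : (0:Int) < i)]
  refine List.Nodup.map ?_ (List.nodup_range)
  intro a b hab
  simp only at hab
  have h2 : (i : Int) * a = i * b := by linarith
  have hine : (i : Int) ≠ 0 := by exact_mod_cast hi.ne'
  exact_mod_cast mul_left_cancel₀ hine h2

theorem pv_foldl_pointwise (u : Int → Int) (step : List Int → Int → List Int)
    (hlen : ∀ l j, (step l j).length = l.length)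
    (hval : ∀ (l : List Int) (j : Int), 0 ≤ j → j < (l.length : Int) →
      ∀ t : Nat, t < l.length →
        (step l j).getD t 0 = if (t : Int) = j then u (l.getD t 0) else l.getD t 0)
    : ∀ (idxs : List Int) (phi : List Int), idxs.Nodup →
      (∀ j ∈ idxs, 0 ≤ j ∧ j < (phi.length : Int)) →
      (idxs.foldl step phi).length = phi.length ∧
      (∀ t : Nat, t < phi.length →
        (idxs.foldl step phi).getD t 0 =
          if (t : Int) ∈ idxs then u (phi.getD t 0) else phi.getD t 0) := by
  intro idxs
  induction idxs with
  | nil => intro phi _ _; simp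
  | cons j rest ih =>
      intro phi hnd hrng
      have hj := hrng j (by simp)
      have hlen' : (step phi j).length = phi.length := hlen phi j
      have hrest := ih (step phi j) (List.Nodup.of_cons hnd)
        (by intro x hx; rw [hlen']; exact hrng x (List.mem_cons_of_mem _ hx))
      have hjnot : j ∉ rest := (List.nodup_cons.mp hnd).1
      refine ⟨by rw [List.foldl_cons, hrest.1, hlen'], ?_⟩
      intro t ht
      rw [List.foldl_cons, hrest.2 t (by rwa [hlen']),
        hval phi j hj.1 hj.2 t ht]
      by_cases h1 : (t : Int) = j
      · subst h1
        simp [hjnot]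
      · by_cases h2 : (t : Int) ∈ rest <;> simp [h1, h2]

-- A-side invariant
def pvAList (N m : Nat) : List Int :=
  (List.range (N+1)).map fun j => ((pvAval j m : Nat) : Int)

theorem pvAList_length (N m : Nat) : (pvAList N m).length = N + 1 := by
  simp [pvAList]

theorem pvAList_getD (N m t : Nat) (ht : t ≤ N) :
    (pvAList N m).getD t 0 = ((pvAval t m : Nat) : Int) :=
  pv_getD_map_range _ _ _ (by omega)

theorem pvA_inner_step (N i : Nat) (h2 : 2 ≤ i) (hN : i ≤ N) (hp : Nat.Prime i) :
    pvAInnerL (N : Int) (i : Int) (pvAList N (i-1)) = pvAList N i := by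
  have hi0 : 0 < i := by omega
  have key := pv_foldl_pointwise
    (fun v => PySem.Int.floordiv (v * ((i:Int) - 1)) (i:Int))
    (fun phi j => PySem.List.pySetD phi j
      (PySem.Int.floordiv (PySem.List.pyGetD phi j 0 * ((i:Int) - 1)) (i:Int)))
    (fun l j => PySem.List.length_pySetD l j _)
    ?hval
    (PySem.List.pyRange (i : Int) ((N : Int) + 1) (i : Int))
    (pvAList N (i-1))
    (pv_nodup_mults i N hi0)
    ?hrng
  case hval =>
    intro l j hj0 hjlen t ht
    beta_reduce
    rw [PySem.List.pySetD_of_nonneg _ _ hj0,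
      pv_getD_set _ _ _ _ ht, PySem.List.pyGetD_eq_getElem _ _ hj0 hjlen]
    have hjt : j.toNat < l.length := by omega
    rcases eq_or_ne (t : Int) j with heq | hne
    · have : t = j.toNat := by omega
      subst this
      simp [heq, hjt, List.getD_eq_getElem _ _ hjt]
    · have : t ≠ j.toNat := by omega
      simp [this, hne]
  case hrng =>
    intro j hj
    rw [pvAList_length]
    rcases (pv_mem_mults i N hi0 j).mp hj with ⟨d, hd1, rfl, hdN⟩
    constructor
    · positivity
    · exact_mod_cast by omega
  unfold pvAInnerL
  apply List.ext_getElem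
  · rw [key.1, pvAList_length, pvAList_length]
  · intro t ht1 ht2
    have htN : t ≤ N := by
      have := key.1
      rw [pvAList_length] at this
      omega
    rw [← List.getD_eq_getElem _ 0 ht1, ← List.getD_eq_getElem _ 0 ht2,
      key.2 t (by rw [pvAList_length]; omega), pvAList_getD _ _ _ htN, pvAList_getD _ _ _ htN]
    by_cases hmem : (t : Int) ∈ PySem.List.pyRange (i : Int) ((N : Int) + 1) (i : Int)
    · rcases (pv_mem_mults i N hi0 _).mp hmem with ⟨d, hd1, htd, hdN⟩
      have htd' : t = i * d := by exact_mod_cast htd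
      rw [if_pos hmem]
      beta_reduce
      have hcast : ((pvAval t (i-1) : Nat) : Int) * ((i:Int) - 1)
          = ((pvAval t (i-1) * (i-1) : Nat) : Int) := by
        push_cast [Nat.cast_sub (by omega : 1 ≤ i)]
        ring
      rw [hcast, PySem.Int.floordiv_natCast]
      rw [pvAval_step i t hp ⟨d, htd'⟩ (by rw [htd']; exact Nat.mul_pos (by omega) hd1)]
    · rw [if_neg hmem]
      congr 1
      have hskip : ¬(Nat.Prime i ∧ i ∣ t ∧ t ≠ 0) → pvAval t i = pvAval t (i-1) := by
        intro hcon
        have hh := pvAval_skip t (i-1) (by rw [show (i-1)+1 = i by omega]; exact hcon)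
        rwa [show (i-1)+1 = i by omega] at hh
      refine (hskip ?_).symm
      rintro ⟨_, hdvd, hne⟩
      apply hmem
      apply (pv_mem_mults i N hi0 _).mpr
      obtain ⟨d, rfl⟩ := hdvd
      refine ⟨d, Nat.pos_of_ne_zero (by rintro rfl; simp at hne), by norm_cast, htN⟩

def pvTgt (N : Nat) : List Int :=
  (List.range (N + 1)).map fun j => ((Nat.totient j : Nat) : Int)

theorem pvA_outer (N : Nat) : ∀ m : Nat, 1 ≤ m → m ≤ N →
    ((PySem.List.pyRange 2 ((m:Int)+1)).foldl
      (fun phi i => if PySem.List.pyGetD phi i 0 == i then pvAInnerL (N:Int) i phi else phi)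
      (PySem.List.pyRange 0 ((N:Int)+1))) = pvAList N m := by
  intro m
  induction m with
  | zero => omega
  | succ m ih =>
      intro _ hmN
      rcases Nat.eq_zero_or_pos m with rfl | hm
      · rw [show ((0+1:Nat):Int)+1 = 2 by norm_num,
          PySem.List.pyRange_one_eq_nil (le_refl 2), List.foldl_nil,
          PySem.List.pyRange_one]
        unfold pvAList
        norm_num
        intro j hj
        exact (pvAval_one j).symm
      · have hcast : ((m+1:Nat):Int)+1 = ((m:Int)+1)+1 := by push_cast; ring
        rw [hcast, PySem.List.pyRange_one_succ_right (by exact_mod_cast by omega : (2:Int) ≤ (m:Int)+1),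
          List.foldl_append, ih hm (by omega), List.foldl_cons, List.foldl_nil]
        have hm1 : ((m:Int)+1) = ((m+1:Nat):Int) := by push_cast; ring
        rw [hm1, PySem.List.pyGetD_natCast, pvAList_getD N m (m+1) (by omega)]
        by_cases hpr : Nat.Prime (m+1)
        · have hval : pvAval (m+1) m = m+1 := by
            have := (pvAval_prime_iff (m+1) (by omega)).mpr hpr
            simpa using this
          rw [if_pos (by rw [hval]; exact beq_self_eq_true _)]
          have := pvA_inner_step N (m+1) (by omega) hmN hpr
          simpa using this
        · have hval : pvAval (m+1) m ≠ m+1 := by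
            intro hcon
            exact hpr ((pvAval_prime_iff (m+1) (by omega)).mp (by simpa using hcon))
          rw [if_neg (by simpa using fun hcon => hval (by exact_mod_cast hcon))]
          unfold pvAList
          apply List.map_congr_left
          intro j hj
          rw [pvAval_skip j m (fun hcon => hpr hcon.1)]
theorem pvA_phi_eq (N : Nat) : pvASieveL (N : Int) = pvTgt N := by
  rcases Nat.eq_zero_or_pos N with rfl | hN
  · decide
  · unfold pvASieveL
    rw [pvA_outer N N hN (le_refl N)]
    unfold pvAList pvTgt
    apply List.map_congr_left
    intro j hj
    have hjN : j ≤ N := by simpa using Nat.lt_succ_iff.mp (List.mem_range.mp hj)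
    norm_cast
    exact pvAval_tot j N fun p hp => le_trans (Nat.le_of_mem_primeFactors hp) hjN

def pvSval (j m : Nat) : Int := if 2 ≤ j ∧ j.minFac ≤ m then (j.minFac : Int) else 0

def pvSList (N m : Nat) : List Int := (List.range (N+1)).map fun j => pvSval j m

theorem pvSList_length (N m : Nat) : (pvSList N m).length = N + 1 := by simp [pvSList]

theorem pvSList_getD (N m t : Nat) (ht : t ≤ N) :
    (pvSList N m).getD t 0 = pvSval t m :=
  pv_getD_map_range _ _ _ (by omega)

theorem pv_minFac_two_le (j : Nat) (hj : 2 ≤ j) : 2 ≤ j.minFac :=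
  (Nat.minFac_prime (by omega)).two_le

theorem pvS_inner_step (N i : Nat) (h2 : 2 ≤ i) (hN : i ≤ N) (hp : Nat.Prime i) :
    ((PySem.List.pyRange (i:Int) ((N:Int) + 1) (i:Int)).foldl
      (fun spf j =>
        if PySem.List.pyGetD spf j 0 == 0 then PySem.List.pySetD spf j (i:Int) else spf)
      (pvSList N (i-1))) = pvSList N i := by
  have hi0 : 0 < i := by omega
  have key := pv_foldl_pointwise
    (fun v => if v == 0 then (i:Int) else v)
    (fun spf j => if PySem.List.pyGetD spf j 0 == 0 then PySem.List.pySetD spf j (i:Int) else spf)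
    (fun l j => by beta_reduce; split <;> simp [PySem.List.length_pySetD])
    ?hval
    (PySem.List.pyRange (i : Int) ((N : Int) + 1) (i : Int))
    (pvSList N (i-1))
    (pv_nodup_mults i N hi0)
    ?hrng
  case hval =>
    intro l j hj0 hjlen t ht
    beta_reduce
    rw [PySem.List.pyGetD_eq_getElem _ _ hj0 hjlen]
    have hjt : j.toNat < l.length := by omega
    by_cases hc : l[j.toNat] = 0
    · rw [if_pos (by simpa using hc), PySem.List.pySetD_of_nonneg _ _ hj0, pv_getD_set _ _ _ _ ht]
      rcases eq_or_ne (t : Int) j with heq | hne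
      · have htj : t = j.toNat := by omega
        subst htj
        rw [List.getD_eq_getElem _ _ hjt, hc]
        simp [heq, hjt]
      · have : t ≠ j.toNat := by omega
        simp [this, hne]
    · rw [if_neg (by simpa using hc)]
      rcases eq_or_ne (t : Int) j with heq | hne
      · have htj : t = j.toNat := by omega
        subst htj
        rw [List.getD_eq_getElem _ _ hjt]
        simp [heq, hc]
      · simp [hne]
  case hrng =>
    intro j hj
    rw [pvSList_length]
    rcases (pv_mem_mults i N hi0 j).mp hj with ⟨d, hd1, rfl, hdN⟩
    exact ⟨by positivity, by exact_mod_cast by omega⟩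
  apply List.ext_getElem
  · rw [key.1, pvSList_length, pvSList_length]
  · intro t ht1 ht2
    have htN : t ≤ N := by
      have := key.1
      rw [pvSList_length] at this
      omega
    rw [← List.getD_eq_getElem _ 0 ht1, ← List.getD_eq_getElem _ 0 ht2,
      key.2 t (by rw [pvSList_length]; omega), pvSList_getD _ _ _ htN, pvSList_getD _ _ _ htN]
    by_cases hmem : (t : Int) ∈ PySem.List.pyRange (i : Int) ((N : Int) + 1) (i : Int)
    · rcases (pv_mem_mults i N hi0 _).mp hmem with ⟨d, hd1, htd, hdN⟩
      have htd' : t = i * d := by exact_mod_cast htd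
      have ht2' : 2 ≤ t := by
        rw [htd']
        calc 2 ≤ i := h2
        _ ≤ i * d := Nat.le_mul_of_pos_right _ hd1
      have hdvd : i ∣ t := ⟨d, htd'⟩
      rw [if_pos hmem]
      beta_reduce
      by_cases hmf : t.minFac ≤ i - 1
      · have hv : pvSval t (i-1) = (t.minFac : Int) := by
          rw [pvSval, if_pos ⟨ht2', hmf⟩]
        have hnz : (t.minFac : Int) ≠ 0 := by
          have := pv_minFac_two_le t ht2'
          omega
        rw [hv, if_neg (by simpa using hnz), pvSval, if_pos ⟨ht2', by omega⟩]
      · have hv : pvSval t (i-1) = 0 := by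
          rw [pvSval, if_neg (by rintro ⟨_, h⟩; exact hmf h)]
        have hle : t.minFac ≤ i := Nat.minFac_le_of_dvd h2 hdvd
        have heq : t.minFac = i := by omega
        rw [hv, if_pos (by simp), pvSval, if_pos ⟨ht2', by omega⟩, heq]
    · rw [if_neg hmem]
      rcases Nat.lt_or_ge t 2 with hlt | hge
      · rw [pvSval, pvSval, if_neg (by omega), if_neg (by omega)]
      · rw [pvSval, pvSval]
        by_cases hmf : t.minFac ≤ i - 1
        · rw [if_pos ⟨hge, hmf⟩, if_pos ⟨hge, by omega⟩]
        · rw [if_neg (by rintro ⟨_, h⟩; exact hmf h)]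
          rw [if_neg ?_]
          rintro ⟨_, hle⟩
          have heq : t.minFac = i := by omega
          apply hmem
          apply (pv_mem_mults i N hi0 _).mpr
          obtain ⟨d, hd⟩ := heq ▸ Nat.minFac_dvd t
          refine ⟨d, ?_, by rw [hd], by omega⟩
          rcases Nat.eq_zero_or_pos d with rfl | h
          · omega
          · exact h

theorem pvSval_one (j : Nat) : pvSval j 1 = 0 := by
  rw [pvSval]
  rcases Nat.lt_or_ge j 2 with h | h
  · rw [if_neg (by omega)]
  · rw [if_neg (by rintro ⟨_, hle⟩; have := pv_minFac_two_le j h; omega)]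

theorem pvS_outer (N : Nat) : ∀ m : Nat, 1 ≤ m → m ≤ N →
    ((PySem.List.pyRange 2 ((m:Int)+1)).foldl
      (fun spf i =>
        if PySem.List.pyGetD spf i 0 == 0 then
          (PySem.List.pyRange i ((N:Int) + 1) i).foldl
            (fun spf j =>
              if PySem.List.pyGetD spf j 0 == 0 then PySem.List.pySetD spf j i else spf) spf
        else spf)
      (List.replicate (((N:Int)+1).toNat) 0)) = pvSList N m := by
  intro m
  induction m with
  | zero => omega
  | succ m ih =>
      intro _ hmN
      rcases Nat.eq_zero_or_pos m with rfl | hm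
      · rw [show ((0+1:Nat):Int)+1 = 2 by norm_num,
          PySem.List.pyRange_one_eq_nil (le_refl 2), List.foldl_nil]
        have hlen : (((N:Int)+1).toNat) = N + 1 := by omega
        rw [hlen]
        apply List.ext_getElem
        · simp [pvSList_length]
        · intro t ht1 ht2
          rw [← List.getD_eq_getElem _ 0 ht1, ← List.getD_eq_getElem _ 0 ht2]
          simp only [List.length_replicate] at ht1
          rw [List.getD_eq_getElem _ 0 (by simpa using ht1), List.getElem_replicate,
            pvSList_getD N _ t (by omega), pvSval_one]
      · have hcast : ((m+1:Nat):Int)+1 = ((m:Int)+1)+1 := by push_cast; ring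
        rw [hcast, PySem.List.pyRange_one_succ_right (by exact_mod_cast by omega : (2:Int) ≤ (m:Int)+1),
          List.foldl_append, ih hm (by omega), List.foldl_cons, List.foldl_nil]
        have hm1 : ((m:Int)+1) = ((m+1:Nat):Int) := by push_cast; ring
        rw [hm1, PySem.List.pyGetD_natCast, pvSList_getD N m (m+1) (by omega)]
        by_cases hpr : Nat.Prime (m+1)
        · have hmf : (m+1).minFac = m+1 := (Nat.prime_def_minFac.mp hpr).2
          have hv : pvSval (m+1) m = 0 := by
            rw [pvSval, if_neg (by rintro ⟨_, hle⟩; omega)]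
          rw [hv, if_pos (by simp)]
          have := pvS_inner_step N (m+1) (by omega) hmN hpr
          simpa using this
        · have hmflt : (m+1).minFac ≤ m := by
            have h1 := Nat.minFac_le (by omega : 0 < m+1)
            rcases Nat.lt_or_ge (m+1).minFac (m+1) with h | h
            · omega
            · exfalso; exact hpr (Nat.prime_def_minFac.mpr ⟨by omega, by omega⟩)
          have hv : pvSval (m+1) m = ((m+1).minFac : Int) := by
            rw [pvSval, if_pos ⟨by omega, hmflt⟩]
          have hnz : ((m+1).minFac : Int) ≠ 0 := by
            have := pv_minFac_two_le (m+1) (by omega)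
            omega
          rw [hv, if_neg (by simpa using hnz)]
          unfold pvSList
          apply List.map_congr_left
          intro j hj
          rw [pvSval, pvSval]
          rcases Nat.lt_or_ge j 2 with h | h
          · rw [if_neg (by omega), if_neg (by omega)]
          · have hne : j.minFac ≠ m+1 := by
              intro hcon
              exact hpr (hcon ▸ Nat.minFac_prime (by omega : j ≠ 1))
            by_cases hle : j.minFac ≤ m
            · rw [if_pos ⟨h, hle⟩, if_pos ⟨h, by omega⟩]
            · rw [if_neg (by rintro ⟨_, hc⟩; omega), if_neg (by rintro ⟨_, hc⟩; omega)]

theorem pvBSpf_eq (N : Nat) (hN : 1 ≤ N) : pvBSpfL (N:Int) = pvSList N N := by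
  unfold pvBSpfL
  exact pvS_outer N N hN (le_refl N)

theorem pvBSpf_getD (N j : Nat) (h2 : 2 ≤ j) (hN : j ≤ N) :
    (pvBSpfL (N:Int)).getD j 0 = (j.minFac : Int) := by
  rw [pvBSpf_eq N (by omega), pvSList_getD N N j hN, pvSval,
    if_pos ⟨h2, le_trans (Nat.minFac_le (by omega)) hN⟩]

def pvPval (j m : Nat) : Int := if j ≤ m ∨ j = 0 then ((Nat.totient j : Nat) : Int) else 0

def pvPList (N m : Nat) : List Int := (List.range (N+1)).map fun j => pvPval j m

theorem pvPList_length (N m : Nat) : (pvPList N m).length = N + 1 := by simp [pvPList]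

theorem pvPList_getD (N m t : Nat) (ht : t ≤ N) :
    (pvPList N m).getD t 0 = pvPval t m :=
  pv_getD_map_range _ _ _ (by omega)

theorem pvP_outer (N : Nat) (hN : 1 ≤ N) : ∀ m : Nat, 1 ≤ m → m ≤ N →
    ((PySem.List.pyRange 2 ((m:Int)+1)).foldl
      (fun phi i =>
        PySem.List.pySetD phi i
          (if PySem.Int.mod (PySem.Int.floordiv i (PySem.List.pyGetD (pvBSpfL (N:Int)) i 0))
                (PySem.List.pyGetD (pvBSpfL (N:Int)) i 0) == 0
           then PySem.List.pyGetD phi (PySem.Int.floordiv i (PySem.List.pyGetD (pvBSpfL (N:Int)) i 0)) 0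
                  * PySem.List.pyGetD (pvBSpfL (N:Int)) i 0
           else PySem.List.pyGetD phi (PySem.Int.floordiv i (PySem.List.pyGetD (pvBSpfL (N:Int)) i 0)) 0
                  * (PySem.List.pyGetD (pvBSpfL (N:Int)) i 0 - 1)))
      (PySem.List.pySetD (List.replicate (((N:Int)+1).toNat) 0) 1 1)) = pvPList N m := by
  intro m
  induction m with
  | zero => omega
  | succ m ih =>
      intro _ hmN
      rcases Nat.eq_zero_or_pos m with rfl | hm
      · rw [show ((0+1:Nat):Int)+1 = 2 by norm_num,
          PySem.List.pyRange_one_eq_nil (le_refl 2), List.foldl_nil]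
        have hlen : (((N:Int)+1).toNat) = N + 1 := by omega
        rw [hlen, PySem.List.pySetD_of_nonneg _ _ (by norm_num), Int.toNat_one]
        apply List.ext_getElem
        · simp [pvPList_length]
        · intro t ht1 ht2
          have ht1' : t < N + 1 := by simpa using ht1
          rw [← List.getD_eq_getElem _ 0 ht1, ← List.getD_eq_getElem _ 0 ht2,
            pv_getD_set _ _ _ _ (by simpa using ht1'),
            pvPList_getD N _ t (by omega)]
          rcases Nat.eq_zero_or_pos t with rfl | ht0
          · simp [pvPval]
          · rcases eq_or_ne t 1 with rfl | hne
            · simp [pvPval, List.length_replicate]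
              omega
            · rw [if_neg (by omega), pvPval, if_neg (by omega),
                List.getD_eq_getElem _ 0 (by simpa using ht1), List.getElem_replicate]
      · have hcast : ((m+1:Nat):Int)+1 = ((m:Int)+1)+1 := by push_cast; ring
        rw [hcast, PySem.List.pyRange_one_succ_right (by exact_mod_cast by omega : (2:Int) ≤ (m:Int)+1),
          List.foldl_append, ih hm (by omega), List.foldl_cons, List.foldl_nil]
        have hm1 : ((m:Int)+1) = ((m+1:Nat):Int) := by push_cast; ring
        have hFp : (m+1).minFac.Prime := Nat.minFac_prime (by omega : m+1 ≠ 1)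
        have hF2 : 2 ≤ (m+1).minFac := hFp.two_le
        have hFd : (m+1).minFac ∣ (m+1) := Nat.minFac_dvd _
        set F := (m+1).minFac with hFdef
        have hspf : PySem.List.pyGetD (pvBSpfL (N:Int)) ((m:Int)+1) 0 = (F : Int) := by
          rw [hm1, PySem.List.pyGetD_natCast, pvBSpf_getD N (m+1) (by omega) hmN]
        rw [hspf, hm1]
        have hfd : PySem.Int.floordiv ((m+1:Nat):Int) (F:Int) = (((m+1)/F : Nat) : Int) :=
          PySem.Int.floordiv_natCast _ _
        rw [hfd]
        have hm'le : (m+1)/F ≤ m := by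
          have h1 : (m+1)/F ≤ (m+1)/2 := Nat.div_le_div_left hF2 (by norm_num)
          omega
        have hm'pos : 0 < (m+1)/F := Nat.div_pos (Nat.minFac_le (by omega)) (by omega)
        have hmul : F * ((m+1)/F) = m+1 := Nat.mul_div_cancel' hFd
        rw [PySem.List.pyGetD_natCast, pvPList_getD N m _ (by omega),
          pvPval, if_pos (Or.inl hm'le)]
        have hmodiff : (PySem.Int.mod (((m+1)/F : Nat) : Int) (F:Int) == 0) = true
            ↔ F ∣ (m+1)/F := by
          rw [beq_iff_eq, PySem.Int.mod_eq_zero_iff_dvd, Int.natCast_dvd_natCast]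
        have hval : (if PySem.Int.mod (((m+1)/F : Nat) : Int) (F:Int) == 0
              then ((Nat.totient ((m+1)/F) : Nat) : Int) * (F : Int)
              else ((Nat.totient ((m+1)/F) : Nat) : Int) * ((F : Int) - 1))
            = ((Nat.totient (m+1) : Nat) : Int) := by
          by_cases hdd : F ∣ (m+1)/F
          · rw [if_pos (hmodiff.mpr hdd)]
            have : Nat.totient (m+1) = F * Nat.totient ((m+1)/F) := by
              conv_lhs => rw [← hmul]
              exact Nat.totient_mul_of_prime_of_dvd hFp hdd
            rw [this]
            push_cast
            ring
          · rw [if_neg (by simpa using fun hc => hdd (hmodiff.mp (by simpa using hc)))]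
            have hcop : Nat.Coprime F ((m+1)/F) := (Nat.Prime.coprime_iff_not_dvd hFp).mpr hdd
            have : Nat.totient (m+1) = (F - 1) * Nat.totient ((m+1)/F) := by
              conv_lhs => rw [← hmul]
              rw [Nat.totient_mul hcop, Nat.totient_prime hFp]
            rw [this]
            push_cast [Nat.cast_sub (by omega : 1 ≤ F)]
            ring
        rw [hval, PySem.List.pySetD_natCast]
        apply List.ext_getElem
        · simp [pvPList_length]
        · intro t ht1 ht2
          have ht1' : t < N + 1 := by simpa [pvPList_length] using ht1
          rw [← List.getD_eq_getElem _ 0 ht1, ← List.getD_eq_getElem _ 0 ht2,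
            pv_getD_set _ _ _ _ (by rw [pvPList_length]; omega),
            pvPList_getD N _ t (by omega), pvPList_getD N _ t (by omega)]
          rcases eq_or_ne t (m+1) with rfl | hne
          · rw [if_pos rfl, if_pos (by rw [pvPList_length]; omega), pvPval, if_pos (Or.inl (le_refl _))]
          · rw [if_neg hne, pvPval, pvPval]
            rcases Nat.eq_zero_or_pos t with rfl | ht0
            · simp
            · by_cases hle : t ≤ m
              · rw [if_pos (Or.inl hle), if_pos (Or.inl (by omega))]
              · rw [if_neg (by omega), if_neg (by omega)]

theorem pvB_phi_eq (N : Nat) : pvBPhiL (N : Int) = pvTgt N := by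
  rcases Nat.eq_zero_or_pos N with rfl | hN
  · decide
  · unfold pvBPhiL
    show ((PySem.List.pyRange 2 ((N:Int)+1)).foldl
      (fun phi i =>
        PySem.List.pySetD phi i
          (if PySem.Int.mod (PySem.Int.floordiv i (PySem.List.pyGetD (pvBSpfL (N:Int)) i 0))
                (PySem.List.pyGetD (pvBSpfL (N:Int)) i 0) == 0
           then PySem.List.pyGetD phi (PySem.Int.floordiv i (PySem.List.pyGetD (pvBSpfL (N:Int)) i 0)) 0
                  * PySem.List.pyGetD (pvBSpfL (N:Int)) i 0
           else PySem.List.pyGetD phi (PySem.Int.floordiv i (PySem.List.pyGetD (pvBSpfL (N:Int)) i 0)) 0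
                  * (PySem.List.pyGetD (pvBSpfL (N:Int)) i 0 - 1)))
      (if (N:Int) ≥ 1 then PySem.List.pySetD (List.replicate (((N:Int)+1).toNat) 0) 1 1
       else List.replicate (((N:Int)+1).toNat) 0)) = pvTgt N
    rw [if_pos (by exact_mod_cast hN : (N:Int) ≥ 1)]
    rw [pvP_outer N hN N hN (le_refl N)]
    unfold pvPList pvTgt
    apply List.map_congr_left
    intro j hj
    rw [pvPval, if_pos (Or.inl (by simpa using Nat.lt_succ_iff.mp (List.mem_range.mp hj)))]

theorem pv_phi_eqL (n : Int) : pvASieveL n = pvBPhiL n := by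
  cases n with
  | ofNat N => exact (pvA_phi_eq N).trans (pvB_phi_eq N).symm
  | negSucc M =>
      have h1 : (Int.negSucc M) + 1 ≤ 0 := by omega
      have h2 : (Int.negSucc M) + 1 ≤ 2 := by omega
      have h0 : (Int.negSucc M) + 1 ≤ 0 → ((Int.negSucc M) + 1).toNat = 0 := by omega
      simp [pvASieveL, pvBPhiL, pvBSpfL, PySem.List.pyRange_one_eq_nil h2,
        PySem.List.pyRange_one_eq_nil h1, h0 h1]
      omega


-- ===== bridge: the array ports compute the list-level models =====
theorem pvGetD_toList (a : Array Int) (i d : Int) :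
    pvGetD a i d = PySem.List.pyGetD a.toList i d := by
  unfold pvGetD
  simp only [PySem.List.pyGetD, PySem.List.pyGet?, PySem.List.pyIdx?, Array.getD,
    Array.length_toList]
  split_ifs with h1 h2 h3 h4 h5 <;>
    simp_all [Option.getD, Array.getElem_toList, List.getD_eq_getElem?_getD,
      List.getElem?_eq_getElem, Array.length_toList] <;> omega

theorem pvSetD_toList (a : Array Int) (i v : Int) (h : 0 ≤ i) :
    (pvSetD a i v).toList = PySem.List.pySetD a.toList i v := by
  rw [pvSetD, if_pos h, PySem.List.pySetD_of_nonneg _ _ h, Array.toList_setIfInBounds]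

theorem pv_foldl_toList (idxs : List Int) (stepA : Array Int → Int → Array Int)
    (stepL : List Int → Int → List Int)
    (h : ∀ (b : Array Int) (j : Int), j ∈ idxs → (stepA b j).toList = stepL b.toList j) :
    ∀ a : Array Int, (idxs.foldl stepA a).toList = idxs.foldl stepL a.toList := by
  induction idxs with
  | nil => intro a; simp
  | cons j rest ih =>
      intro a
      rw [List.foldl_cons, List.foldl_cons, ← h a j (by simp),
        ih (fun b x hx => h b x (List.mem_cons_of_mem _ hx)) _]

theorem pvAInner_toList (n i : Int) (hi : 0 < i) (b : Array Int) :
    (pvAInner n i b).toList = pvAInnerL n i b.toList := by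
  unfold pvAInner pvAInnerL
  refine pv_foldl_toList _ _ _ ?_ b
  intro b' j hj
  have hj0 : 0 ≤ j := le_trans (le_of_lt hi) ((PySem.List.mem_pyRange_iff_of_pos hi j).mp hj).1
  beta_reduce
  rw [pvSetD_toList _ _ _ hj0, pvGetD_toList]

theorem pvASieve_toList (n : Int) : (pvASieve n).toList = pvASieveL n := by
  unfold pvASieve pvASieveL
  have hstep : ∀ (b : Array Int) (j : Int), j ∈ PySem.List.pyRange 2 (n + 1) →
      ((fun phi i => if pvGetD phi i 0 == i then pvAInner n i phi else phi) b j).toList =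
      (fun phi i => if PySem.List.pyGetD phi i 0 == i then pvAInnerL n i phi else phi) b.toList j := by
    intro b j hj
    have hj2 : (2:Int) ≤ j := (PySem.List.mem_pyRange_one.mp hj).1
    beta_reduce
    rw [pvGetD_toList]
    split_ifs
    · exact pvAInner_toList n j (by omega) b
    · rfl
  rw [pv_foldl_toList _ _
    (fun phi i => if PySem.List.pyGetD phi i 0 == i then pvAInnerL n i phi else phi) hstep]

theorem pvBSpf_toList (n : Int) : (pvBSpf n).toList = pvBSpfL n := by
  unfold pvBSpf pvBSpfL
  have hstep : ∀ (b : Array Int) (j : Int), j ∈ PySem.List.pyRange 2 (n + 1) →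
      ((fun spf i =>
        if pvGetD spf i 0 == 0 then
          (PySem.List.pyRange i (n + 1) i).foldl
            (fun spf j => if pvGetD spf j 0 == 0 then pvSetD spf j i else spf) spf
        else spf) b j).toList =
      (fun spf i =>
        if PySem.List.pyGetD spf i 0 == 0 then
          (PySem.List.pyRange i (n + 1) i).foldl
            (fun spf j =>
              if PySem.List.pyGetD spf j 0 == 0 then PySem.List.pySetD spf j i else spf) spf
        else spf) b.toList j := by
    intro b j hj
    have hj2 : (2:Int) ≤ j := (PySem.List.mem_pyRange_one.mp hj).1
    beta_reduce
    rw [pvGetD_toList]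
    split_ifs
    · refine pv_foldl_toList _ _ _ ?_ b
      intro b' x hx
      have hx0 : 0 ≤ x :=
        le_trans (by omega) ((PySem.List.mem_pyRange_iff_of_pos (by omega : (0:Int) < j) x).mp hx).1
      beta_reduce
      rw [pvGetD_toList]
      split_ifs
      · exact pvSetD_toList _ _ _ hx0
      · rfl
    · rfl
  rw [pv_foldl_toList _ _
    (fun spf i =>
      if PySem.List.pyGetD spf i 0 == 0 then
        (PySem.List.pyRange i (n + 1) i).foldl
          (fun spf j =>
            if PySem.List.pyGetD spf j 0 == 0 then PySem.List.pySetD spf j i else spf) spf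
      else spf) hstep]

theorem pvBPhi_toList (n : Int) : (pvBPhi n).toList = pvBPhiL n := by
  show ((PySem.List.pyRange 2 (n + 1)).foldl
      (fun phi i =>
        pvSetD phi i
          (if PySem.Int.mod (PySem.Int.floordiv i (pvGetD (pvBSpf n) i 0)) (pvGetD (pvBSpf n) i 0) == 0
           then pvGetD phi (PySem.Int.floordiv i (pvGetD (pvBSpf n) i 0)) 0 * pvGetD (pvBSpf n) i 0
           else pvGetD phi (PySem.Int.floordiv i (pvGetD (pvBSpf n) i 0)) 0 * (pvGetD (pvBSpf n) i 0 - 1)))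
      (if n ≥ 1 then pvSetD ((List.replicate (n + 1).toNat 0).toArray) 1 1
       else (List.replicate (n + 1).toNat 0).toArray)).toList = pvBPhiL n
  unfold pvBPhiL
  have hstep : ∀ (b : Array Int) (j : Int), j ∈ PySem.List.pyRange 2 (n + 1) →
      ((fun phi i =>
        pvSetD phi i
          (if PySem.Int.mod (PySem.Int.floordiv i (pvGetD (pvBSpf n) i 0)) (pvGetD (pvBSpf n) i 0) == 0
           then pvGetD phi (PySem.Int.floordiv i (pvGetD (pvBSpf n) i 0)) 0 * pvGetD (pvBSpf n) i 0
           else pvGetD phi (PySem.Int.floordiv i (pvGetD (pvBSpf n) i 0)) 0 * (pvGetD (pvBSpf n) i 0 - 1))) b j).toList =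
      (fun phi i =>
        PySem.List.pySetD phi i
          (if PySem.Int.mod (PySem.Int.floordiv i (PySem.List.pyGetD (pvBSpfL n) i 0))
                (PySem.List.pyGetD (pvBSpfL n) i 0) == 0
           then PySem.List.pyGetD phi (PySem.Int.floordiv i (PySem.List.pyGetD (pvBSpfL n) i 0)) 0
                  * PySem.List.pyGetD (pvBSpfL n) i 0
           else PySem.List.pyGetD phi (PySem.Int.floordiv i (PySem.List.pyGetD (pvBSpfL n) i 0)) 0
                  * (PySem.List.pyGetD (pvBSpfL n) i 0 - 1))) b.toList j := by
    intro b j hj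
    have hj2 : (2:Int) ≤ j := (PySem.List.mem_pyRange_one.mp hj).1
    beta_reduce
    rw [pvSetD_toList _ _ _ (by omega), pvGetD_toList, pvGetD_toList, pvBSpf_toList]
  rw [pv_foldl_toList _ _
    (fun phi i =>
      PySem.List.pySetD phi i
        (if PySem.Int.mod (PySem.Int.floordiv i (PySem.List.pyGetD (pvBSpfL n) i 0))
              (PySem.List.pyGetD (pvBSpfL n) i 0) == 0
         then PySem.List.pyGetD phi (PySem.Int.floordiv i (PySem.List.pyGetD (pvBSpfL n) i 0)) 0
                * PySem.List.pyGetD (pvBSpfL n) i 0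
         else PySem.List.pyGetD phi (PySem.Int.floordiv i (PySem.List.pyGetD (pvBSpfL n) i 0)) 0
                * (PySem.List.pyGetD (pvBSpfL n) i 0 - 1))) hstep]
  split_ifs
  · rw [pvSetD_toList _ _ _ (by norm_num)]
  · simp

theorem pv_phi_eq (n : Int) : pvASieve n = pvBPhi n := by
  rw [← Array.toList_inj, pvASieve_toList, pvBPhi_toList, pv_phi_eqL]

-- ===== VERDICT (by name: the statement is the Claim_ definition above) =====
theorem calculate_sum_lcm_gcd_spec : Claim_equal_calculate_sum_lcm_gcd := by
  intro n MOD _ _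
  unfold Spec_calculate_sum_lcm_gcd calculate_sum_lcm_gcd calculate_sum_lcm_gcd_alt
  rw [pv_phi_eq]
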